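-- pv_equiv track=rewrite | github.com/varshinireddyt/Python | Arrays/Number of Teams.py | numberOfTeams
-- ===== SOURCE A (Python) =====
-- from math import comb
--
-- def numberOfTeams(num,skills,minAssociates,minLevel,maxLevel):
--     count = 0
--     for i in range(len(skills)):
--         if minLevel <= skills[i] <= maxLevel:
--             count += 1
--     sum = 0
--     while minAssociates <= count:
--         sum = sum + comb(count,minAssociates)
--         minAssociates += 1
--     return sum
-- ===== SOURCE B (Python) =====
-- def numberOfTeams(num, skills, minAssociates, minLevel, maxLevel):
--     count = 0
--     for s in skills:
--         if minLevel <= s <= maxLevel: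
--             count += 1
--     if minAssociates > count:
--         return 0
--     # sum_{k>=minAssociates} C(count,k) = 2**count - sum_{k<minAssociates} C(count,k),
--     # prefix computed with the incremental recurrence C(c,k+1) = C(c,k)*(c-k)//(k+1)
--     prefix = 0
--     coef = 1
--     for k in range(minAssociates):
--         prefix += coef
--         coef = coef * (count - k) // (k + 1)
--     return 2 ** count - prefix
-- ===== Notes on version B (the rewrite author's own statement) =====
-- stated objective: alternative
-- what changed: B replaces A's loop of independent comb(count,k) calls over the tail k=minAssociates..count by the identity sum_{k>=m} C(c,k) = 2^c - prefix, computing the prefix sum with the incremental recurrence C(c,k+1)=C(c,k)*(c-k)//(k+1); it trades per-k comb calls for one power of two and a short multiplicative loop.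
import Mathlib
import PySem

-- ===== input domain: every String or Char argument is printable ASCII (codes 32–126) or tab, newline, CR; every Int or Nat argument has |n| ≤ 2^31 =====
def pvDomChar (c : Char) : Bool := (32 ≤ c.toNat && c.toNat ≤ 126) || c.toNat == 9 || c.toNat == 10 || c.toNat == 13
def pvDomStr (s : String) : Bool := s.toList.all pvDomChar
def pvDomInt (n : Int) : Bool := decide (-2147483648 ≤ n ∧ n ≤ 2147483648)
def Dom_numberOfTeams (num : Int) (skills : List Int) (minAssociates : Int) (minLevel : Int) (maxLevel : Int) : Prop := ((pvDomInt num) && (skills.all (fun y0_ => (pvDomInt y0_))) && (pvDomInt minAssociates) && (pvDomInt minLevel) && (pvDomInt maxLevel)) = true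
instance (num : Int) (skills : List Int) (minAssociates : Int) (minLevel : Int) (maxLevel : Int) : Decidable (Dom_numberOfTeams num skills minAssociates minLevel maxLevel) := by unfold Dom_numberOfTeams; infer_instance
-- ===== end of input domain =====

-- B replaces A's per-k calls to comb by the closed form 2^count minus an incrementally
-- computed prefix of binomial coefficients (C(c,k+1) = C(c,k)*(c-k)//(k+1)).

-- ===== PORT A =====
-- while minAssociates <= count: sum += comb(count, minAssociates); minAssociates += 1
def pvLoopA (count m s : Int) : Int :=
  if m ≤ count then pvLoopA count (m + 1) (s + (count.toNat.choose m.toNat : Int)) else s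
termination_by (count - m + 1).toNat
decreasing_by omega

def numberOfTeams (num : Int) (skills : List Int) (minAssociates : Int) (minLevel : Int) (maxLevel : Int) : Int :=
  let count := (PySem.List.pyRange 0 (skills.length : Int) 1).foldl
    (fun cnt i => if minLevel ≤ PySem.List.pyGetD skills i 0 ∧ PySem.List.pyGetD skills i 0 ≤ maxLevel then cnt + 1 else cnt) 0
  pvLoopA count minAssociates 0

-- ===== PORT B =====
def numberOfTeams_alt (num : Int) (skills : List Int) (minAssociates : Int) (minLevel : Int) (maxLevel : Int) : Int :=
  let count := skills.foldl (fun cnt s => if minLevel ≤ s ∧ s ≤ maxLevel then cnt + 1 else cnt) 0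
  if minAssociates > count then 0
  else
    let pc := (PySem.List.pyRange 0 minAssociates 1).foldl
      (fun (pc : Int × Int) k => (pc.1 + pc.2, PySem.Int.floordiv (pc.2 * (count - k)) (k + 1))) (0, 1)
    2 ^ count.toNat - pc.1

-- ===== PRECONDITION & SPEC =====
-- Pre_ excludes minAssociates < 0, on which A's comb(count, minAssociates) raises ValueError.
def Pre_numberOfTeams (num : Int) (skills : List Int) (minAssociates : Int) (minLevel : Int) (maxLevel : Int) : Prop :=
  0 ≤ minAssociates
instance (num : Int) (skills : List Int) (minAssociates : Int) (minLevel : Int) (maxLevel : Int) : Decidable (Pre_numberOfTeams num skills minAssociates minLevel maxLevel) := by unfold Pre_numberOfTeams; infer_instance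

def pvWitness_numberOfTeams : Int × List Int × Int × Int × Int := (4, [1, 2, 3], 2, 1, 3)

def Spec_numberOfTeams (num : Int) (skills : List Int) (minAssociates : Int) (minLevel : Int) (maxLevel : Int) (out : Int) : Prop := out = numberOfTeams_alt num skills minAssociates minLevel maxLevel
instance (num : Int) (skills : List Int) (minAssociates : Int) (minLevel : Int) (maxLevel : Int) (out : Int) : Decidable (Spec_numberOfTeams num skills minAssociates minLevel maxLevel out) := by unfold Spec_numberOfTeams; infer_instance

-- ===== CLAIM (what is proved, stated in full; the proofs are below) =====
def Claim_equal_numberOfTeams : Prop := ∀ (num : Int) (skills : List Int) (minAssociates : Int) (minLevel : Int) (maxLevel : Int), Dom_numberOfTeams num skills minAssociates minLevel maxLevel → Pre_numberOfTeams num skills minAssociates minLevel maxLevel → Spec_numberOfTeams num skills minAssociates minLevel maxLevel (numberOfTeams num skills minAssociates minLevel maxLevel)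

-- ===== LEMMAS AND PROOFS =====

-- A's while loop computes s plus the tail sum of binomial coefficients.
theorem pvLoopA_eq (n : Nat) : ∀ (c m s : Int), 0 ≤ c → 0 ≤ m → (c - m + 1).toNat ≤ n →
    pvLoopA c m s = s + (Finset.Ico m.toNat (c.toNat + 1)).sum (fun k => (c.toNat.choose k : Int)) := by
  induction n with
  | zero =>
    intro c m s hc hm hn
    rw [pvLoopA, if_neg (by omega), Finset.Ico_eq_empty (by omega)]
    simp
  | succ n ih =>
    intro c m s hc hm hn
    rw [pvLoopA]
    by_cases h : m ≤ c
    · rw [if_pos h, ih c (m + 1) _ hc (by omega) (by omega)]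
      have hmt : (m + 1).toNat = m.toNat + 1 := by omega
      rw [hmt, Finset.sum_eq_sum_Ico_succ_bot (by omega : m.toNat < c.toNat + 1)]
      ring
    · rw [if_neg h, Finset.Ico_eq_empty (by omega)]
      simp

-- B's prefix loop: after j steps, (prefix, coef) = (sum of the first j binomials, C(c, j)).
theorem pvPrefix_eq (c : Int) (hc : 0 ≤ c) : ∀ (j : Nat), j ≤ c.toNat →
    (PySem.List.pyRange 0 (j : Int) 1).foldl
      (fun (pc : Int × Int) k => (pc.1 + pc.2, PySem.Int.floordiv (pc.2 * (c - k)) (k + 1))) (0, 1)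
    = ((Finset.range j).sum (fun k => (c.toNat.choose k : Int)), (c.toNat.choose j : Int)) := by
  intro j
  induction j with
  | zero =>
    intro _
    rw [PySem.List.pyRange_one_eq_nil (by omega)]
    simp
  | succ j ih =>
    intro hj
    have h1 : ((j : Int) + 1 : Int) = ((j + 1 : Nat) : Int) := by push_cast; ring
    rw [← h1, PySem.List.pyRange_one_succ_right (by omega), List.foldl_append,
      ih (by omega)]
    simp only [List.foldl_cons, List.foldl_nil, Prod.mk.injEq]
    constructor
    · rw [Finset.sum_range_succ]
    · have hsub : c - (j : Int) = ((c.toNat - j : Nat) : Int) := by omega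
      rw [hsub, h1, ← Int.natCast_mul, PySem.Int.floordiv_natCast]
      have hch : c.toNat.choose j * (c.toNat - j) = c.toNat.choose (j + 1) * (j + 1) := by
        rw [← Nat.choose_succ_right_eq]
      rw [hch, Nat.mul_div_cancel _ (by omega)]

-- the count accumulator never decreases below its start
theorem pvCount_nonneg (minL maxL : Int) : ∀ (xs : List Int) (a : Int),
    a ≤ xs.foldl (fun cnt s => if minL ≤ s ∧ s ≤ maxL then cnt + 1 else cnt) a := by
  intro xs
  induction xs with
  | nil => intro a; simp
  | cons x xs ih =>
    intro a
    simp only [List.foldl_cons]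
    split
    · exact le_trans (by omega) (ih (a + 1))
    · exact ih a

-- ===== VERDICT (by name: the statement is the Claim_ definition above) =====
theorem numberOfTeams_spec : Claim_equal_numberOfTeams := by
  intro num skills m minL maxL _ hm
  unfold Pre_numberOfTeams at hm
  unfold Spec_numberOfTeams
  simp only [numberOfTeams, numberOfTeams_alt]
  rw [PySem.List.foldl_pyRange_zero_pyGetD' skills 0
    (fun cnt v => if minL ≤ v ∧ v ≤ maxL then cnt + 1 else cnt) 0]
  set c : Int := List.foldl (fun cnt v => if minL ≤ v ∧ v ≤ maxL then cnt + 1 else cnt) 0 skills with hcdef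
  have hc : (0 : Int) ≤ c := by rw [hcdef]; exact pvCount_nonneg minL maxL skills 0
  by_cases h : m > c
  · rw [if_pos h, pvLoopA_eq (c - m + 1).toNat c m 0 hc hm (le_refl _),
      Finset.Ico_eq_empty (by omega)]
    simp
  · rw [if_neg h]
    have hmc : (m.toNat : Int) = m := by omega
    rw [pvLoopA_eq (c - m + 1).toNat c m 0 hc hm (le_refl _), ← hmc,
      pvPrefix_eq c hc m.toNat (by omega)]
    dsimp only
    simp only [Int.toNat_natCast]
    have hsplit : (Finset.range m.toNat).sum c.toNat.choose
        + (Finset.Ico m.toNat (c.toNat + 1)).sum c.toNat.choose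
        = 2 ^ c.toNat := by
      rw [← Nat.sum_range_choose c.toNat, Finset.range_eq_Ico,
        ← Finset.sum_Ico_consecutive _ (Nat.zero_le m.toNat) (by omega : m.toNat ≤ c.toNat + 1)]
    have hsplit' : (Finset.range m.toNat).sum (fun k => (c.toNat.choose k : Int))
        + (Finset.Ico m.toNat (c.toNat + 1)).sum (fun k => (c.toNat.choose k : Int))
        = 2 ^ c.toNat := by exact_mod_cast congrArg (fun (n : Nat) => (n : Int)) hsplit
    linarith [hsplit']
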